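-- pv_equiv track=rewrite | github.com/hwennnn/leetcode-solutions | problems/minimum_time_to_remove_all_cars_containing_illegal_goods/solution.py | minimumTime
-- ===== SOURCE A (Python) =====
-- def minimumTime(s: str) -> int:
--     n = len(s)
--
--     if n == 1: return 1 if s == "1" else 0
--
--     left, right = [], []
--
--     curr = 0
--     for x in s:
--         if x == "1":
--             curr += 1
--         else:
--             curr -= 1
--
--         left.append(curr)
--
--     curr = 0
--     for x in s[::-1]:
--         if x == "1":
--             curr += 1
--         else:
--             curr -= 1
--
--         right.append(curr)
--     right.reverse()
--
--     leftMax, leftCurr = [left[0]], left[0]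
--     for i in range(1, n):
--         leftCurr = max(leftCurr, left[i])
--         leftMax.append(leftCurr)
--
--     rightMax, rightCurr = [right[-1]], right[-1]
--     for i in range(n - 2, -1, -1):
--         rightCurr = max(rightCurr, right[i])
--         rightMax.append(rightCurr)
--     rightMax.reverse()
--
--     total = 2 * s.count("1")
--     save = 0
--
--     for i in range(n - 1):
--         save = max(save, max(0, leftMax[i]) + max(0, rightMax[i + 1]))
--
--     return total - save
-- ===== SOURCE B (Python) =====
-- def minimumTime(s: str) -> int:
--     n = len(s)
--     ans = n
--     cost = 0
--     for i, c in enumerate(s):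
--         if c == "1":
--             cost = min(cost + 2, i + 1)
--         ans = min(ans, cost + n - 1 - i)
--     return ans
-- ===== Notes on version B (the rewrite author's own statement) =====
-- stated objective: simpler
-- what changed: Replaces A's six passes (prefix/suffix plus-minus-one sums, two running-maximum arrays, and a final max-save scan) by the standard one-pass prefix DP: cost = min(cost+2, i+1) at each car with illegal goods, combined on the fly with the right-removal cost via ans = min(ans, cost + n-1-i).
import Mathlib
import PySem

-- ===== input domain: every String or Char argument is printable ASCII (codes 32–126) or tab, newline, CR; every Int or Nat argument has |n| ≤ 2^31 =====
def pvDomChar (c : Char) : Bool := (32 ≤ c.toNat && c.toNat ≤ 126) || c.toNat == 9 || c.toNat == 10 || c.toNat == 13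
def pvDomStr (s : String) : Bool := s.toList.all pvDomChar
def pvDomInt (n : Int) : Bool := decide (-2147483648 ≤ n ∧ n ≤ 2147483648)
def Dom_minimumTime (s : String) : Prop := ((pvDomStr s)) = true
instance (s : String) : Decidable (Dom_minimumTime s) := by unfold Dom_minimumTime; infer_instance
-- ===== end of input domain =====

-- B replaces A's six-pass prefix/suffix max-subarray construction by the standard one-pass
-- prefix DP (cost = min(cost+2, i+1) at each '1', combined with right-removal cost on the fly).

-- ===== PORT A =====
-- the loop body shared by A's two accumulation passes ('curr += 1 if x == "1" else -1; out.append(curr)')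
def pvStepAcc (st : List Int × Int) (x : Char) : List Int × Int :=
  let curr := if x == '1' then st.2 + 1 else st.2 - 1
  (st.1 ++ [curr], curr)

-- the loop body shared by A's two running-maximum passes ('c = max(c, xs[i]); out.append(c)')
def pvStepMax (xs : List Int) (st : List Int × Int) (i : Int) : List Int × Int :=
  let c := max st.2 (PySem.List.pyGetD xs i 0)
  (st.1 ++ [c], c)

def minimumTime (s : String) : Int :=
  let l := s.toList
  let n : Int := PySem.Str.len s
  if n == 1 then (if s == "1" then 1 else 0)
  else
    let left := (l.foldl pvStepAcc ([], 0)).1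
    -- s[::-1] is reversal (PySem.List.slice?_none_none_neg_one)
    let right := ((l.reverse.foldl pvStepAcc ([], 0)).1).reverse
    let lm0 := PySem.List.pyGetD left 0 0           -- left[0]  (IndexError on "" is outside Pre_)
    let leftMax := ((PySem.List.pyRange 1 n 1).foldl (pvStepMax left) ([lm0], lm0)).1
    let rm0 := PySem.List.pyGetD right (-1) 0       -- right[-1]
    let rightMax := (((PySem.List.pyRange (n - 2) (-1) (-1)).foldl (pvStepMax right) ([rm0], rm0)).1).reverse
    let total := 2 * (PySem.Str.count s "1" : Int)
    let save := (PySem.List.pyRange 0 (n - 1) 1).foldl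
        (fun sv i => max sv (max 0 (PySem.List.pyGetD leftMax i 0) + max 0 (PySem.List.pyGetD rightMax (i + 1) 0))) 0
    total - save

-- ===== PORT B =====
-- B's loop body: 'if c == "1": cost = min(cost + 2, i + 1); ans = min(ans, cost + n - 1 - i)'
def pvStepB (n : Int) (st : Int × Int × Int) (c : Char) : Int × Int × Int :=
  let cost := if c == '1' then min (st.2.2 + 2) (st.1 + 1) else st.2.2
  (st.1 + 1, min st.2.1 (cost + n - 1 - st.1), cost)

def minimumTime_alt (s : String) : Int :=
  let n : Int := PySem.Str.len s
  (s.toList.foldl (pvStepB n) (0, n, 0)).2.1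

-- ===== PRECONDITION & SPEC =====
-- Pre_ excludes only the empty string, on which A raises IndexError (left[0] of an empty list).
def Pre_minimumTime (s : String) : Prop := s ≠ ""
instance (s : String) : Decidable (Pre_minimumTime s) := by unfold Pre_minimumTime; infer_instance
def pvWitness_minimumTime : String := "0110"

def Spec_minimumTime (s : String) (out : Int) : Prop := out = minimumTime_alt s
instance (s : String) (out : Int) : Decidable (Spec_minimumTime s out) := by unfold Spec_minimumTime; infer_instance

-- ===== CLAIM (what is proved, stated in full; the proofs are below) =====
def Claim_equal_minimumTime : Prop := ∀ (s : String), Dom_minimumTime s → Pre_minimumTime s → Spec_minimumTime s (minimumTime s)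

-- ===== LEMMAS AND PROOFS =====

-- number of '1' cars, as an integer
def pvCnt (l : List Char) : Int := (l.count '1' : Int)
-- (#ones − #zeros), the running quantity of A's first two passes
def pvD (l : List Char) : Int := 2 * pvCnt l - l.length
-- savings of removing the prefix of length a from the left / the suffix from b from the right
def pvP (l : List Char) (a : Nat) : Int := 2 * pvCnt (l.take a) - (a : Int)
def pvQ (l : List Char) (b : Nat) : Int := 2 * pvCnt (l.drop b) - ((l.length : Int) - (b : Int))
-- total time when the prefix of length a is removed from the left, the suffix from b from the right,
-- and the middle ones one by one
def pvF (l : List Char) (a b : Nat) : Int :=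
  (a : Int) + ((l.length : Int) - (b : Int)) + 2 * pvCnt ((l.drop a).take (b - a))
def pvPairs (n : Nat) : Finset (Nat × Nat) :=
  (Finset.range (n+1) ×ˢ Finset.range (n+1)).filter (fun p => p.1 ≤ p.2)
theorem pvPairs_nonempty (n : Nat) : (pvPairs n).Nonempty := ⟨(0,0), by simp [pvPairs]⟩
-- the common reference value: minimum over all cut pairs a ≤ b
def pvM (l : List Char) : Int := (pvPairs l.length).inf' (pvPairs_nonempty _) (fun p => pvF l p.1 p.2)

theorem pvRangeNE (n : Nat) : (Finset.range (n+1)).Nonempty := ⟨0, by simp⟩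

theorem pvCnt_append (a b : List Char) : pvCnt (a ++ b) = pvCnt a + pvCnt b := by
  simp [pvCnt]

theorem pvPQ (l : List Char) (x : Nat) (hx : x ≤ l.length) : pvP l x + pvQ l x = pvD l := by
  have h := List.take_append_drop x l
  have hc : pvCnt l = pvCnt (l.take x) + pvCnt (l.drop x) := by
    conv_lhs => rw [← h]
    exact pvCnt_append _ _
  simp [pvP, pvQ, pvD, hc]; ring

theorem pvSplit (l : List Char) (a b : Nat) (hab : a ≤ b) (hb : b ≤ l.length) :
    pvF l a b = 2 * pvCnt l - (pvP l a + pvQ l b) := by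
  have h1 : pvCnt l = pvCnt (l.take a) + pvCnt (l.drop a) := by
    conv_lhs => rw [← List.take_append_drop a l]
    exact pvCnt_append _ _
  have h2 : pvCnt (l.drop a) = pvCnt ((l.drop a).take (b - a)) + pvCnt (l.drop b) := by
    have : (l.drop a).drop (b - a) = l.drop b := by
      rw [List.drop_drop]; congr 1; omega
    conv_lhs => rw [← List.take_append_drop (b - a) (l.drop a)]
    rw [pvCnt_append, this]
  simp [pvF, pvP, pvQ, h1, h2]; ring

-- ---------- B's side ----------

-- B's cost accumulator: cheapest clearing of the processed prefix by left + middle removals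
def pvC (l : List Char) : Int :=
  (Finset.range (l.length+1)).inf' (pvRangeNE _) (fun a => (a : Int) + 2 * pvCnt (l.drop a))

-- B's answer accumulator after processing prefix t of a string of length nl
def pvA (nl : Int) (t : List Char) : Int :=
  (Finset.range (t.length+1)).inf' (pvRangeNE _) (fun b => pvC (t.take b) + nl - (b : Int))

-- inf'/sup' commute with adding a constant (not in Mathlib for plain linear ordered groups)
theorem pvInfAdd (s : Finset Nat) (h : s.Nonempty) (f : Nat → Int) (k : Int) :
    s.inf' h (fun a => f a + k) = s.inf' h f + k := by
  apply le_antisymm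
  · obtain ⟨i, hi, hEq⟩ := Finset.exists_mem_eq_inf' h f
    rw [hEq]
    exact Finset.inf'_le _ hi
  · apply Finset.le_inf'
    intro a ha
    have := Finset.inf'_le f ha
    linarith

-- peel the top index off a min/max over Finset.range (n+2)
theorem pvInfPeel (n : Nat) (f : Nat → Int) :
    (Finset.range (n+2)).inf' (pvRangeNE _) f = min (f (n+1)) ((Finset.range (n+1)).inf' (pvRangeNE _) f) := by
  apply le_antisymm
  · apply le_min
    · exact Finset.inf'_le _ (by simp [Finset.mem_range])
    · apply Finset.le_inf'
      intro a ha
      exact Finset.inf'_le _ (by simp only [Finset.mem_range] at ha ⊢; omega)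
  · apply Finset.le_inf'
    intro a ha
    simp only [Finset.mem_range] at ha
    rcases Nat.lt_or_ge a (n+1) with h | h
    · exact le_trans (min_le_right _ _) (Finset.inf'_le _ (by simp [Finset.mem_range, h]))
    · have : a = n + 1 := by omega
      rw [this]
      exact min_le_left _ _

theorem pvSupPeel (n : Nat) (f : Nat → Int) :
    (Finset.range (n+2)).sup' (pvRangeNE _) f = max (f (n+1)) ((Finset.range (n+1)).sup' (pvRangeNE _) f) := by
  apply le_antisymm
  · apply Finset.sup'_le
    intro a ha
    simp only [Finset.mem_range] at ha
    rcases Nat.lt_or_ge a (n+1) with h | h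
    · exact le_trans (Finset.le_sup' _ (by simp [Finset.mem_range, h])) (le_max_right _ _)
    · have : a = n + 1 := by omega
      rw [this]
      exact le_max_left _ _
  · apply max_le
    · exact Finset.le_sup' _ (by simp [Finset.mem_range])
    · apply Finset.sup'_le
      intro a ha
      exact Finset.le_sup' _ (by simp only [Finset.mem_range] at ha ⊢; omega)

theorem pvCnt_singleton (c : Char) : pvCnt [c] = if c = '1' then 1 else 0 := by
  by_cases hc : c = '1' <;> simp [pvCnt, List.count_singleton, hc]

theorem pvC_le (t : List Char) : pvC t ≤ (t.length : Int) := by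
  rw [pvC]
  have h := Finset.inf'_le (s := Finset.range (t.length + 1))
    (fun a => (a : Int) + 2 * pvCnt (t.drop a)) (Finset.self_mem_range_succ t.length)
  refine le_trans h ?_
  simp [pvCnt]

theorem pvC_snoc (t : List Char) (c : Char) :
    pvC (t ++ [c]) = if c == '1' then min (pvC t + 2) ((t.length : Int) + 1) else pvC t := by
  have hlen : (t ++ [c]).length = t.length + 1 := by simp
  unfold pvC
  simp only [hlen]
  rw [pvInfPeel]
  have htop : (t ++ [c]).drop (t.length + 1) = [] := by
    apply List.drop_eq_nil_of_le; simp
  have hcongr : (Finset.range (t.length+1)).inf' (pvRangeNE _)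
      (fun a => (a : Int) + 2 * pvCnt ((t ++ [c]).drop a))
      = (Finset.range (t.length+1)).inf' (pvRangeNE _)
      (fun a => ((a : Int) + 2 * pvCnt (t.drop a)) + (if c = '1' then 2 else 0)) := by
    apply Finset.inf'_congr _ rfl
    intro a ha
    have ha' : a ≤ t.length := by simpa [Nat.lt_succ_iff] using ha
    rw [List.drop_append_of_le_length ha', pvCnt_append, pvCnt_singleton]
    by_cases hc : c = '1' <;> simp [hc] <;> ring
  rw [hcongr, pvInfAdd]
  have hpvC : (Finset.range (t.length+1)).inf' (pvRangeNE _)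
      (fun a => (a : Int) + 2 * pvCnt (t.drop a)) = pvC t := rfl
  rw [hpvC, htop]
  have hC := pvC_le t
  have h0 : pvCnt ([] : List Char) = 0 := by simp [pvCnt]
  rw [h0]
  by_cases hc : c = '1'
  · simp only [hc, beq_self_eq_true, if_true]
    push_cast
    omega
  · have hcb : (c == '1') = false := by simp [hc]
    simp only [hcb, Bool.false_eq_true, if_false, if_neg hc]
    push_cast
    omega

theorem pvA_snoc (nl : Int) (t : List Char) (c : Char) :
    pvA nl (t ++ [c]) = min (pvA nl t) (pvC (t ++ [c]) + nl - ((t.length : Int) + 1)) := by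
  have hlen : (t ++ [c]).length = t.length + 1 := by simp
  unfold pvA
  simp only [hlen]
  rw [pvInfPeel]
  have htop : (t ++ [c]).take (t.length + 1) = t ++ [c] := by
    apply List.take_of_length_le; simp
  have hcongr : (Finset.range (t.length+1)).inf' (pvRangeNE _)
      (fun b => pvC ((t ++ [c]).take b) + nl - (b : Int))
      = (Finset.range (t.length+1)).inf' (pvRangeNE _)
      (fun b => pvC (t.take b) + nl - (b : Int)) := by
    apply Finset.inf'_congr _ rfl
    intro b hb
    have hb' : b ≤ t.length := by simpa [Nat.lt_succ_iff] using hb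
    rw [List.take_append_of_le_length hb']
  rw [hcongr, min_comm]
  congr 1
  rw [htop]
  push_cast
  ring

theorem pvC_nil : pvC [] = 0 := by
  simp [pvC, Finset.range_one, pvCnt]

theorem pvA_nil (nl : Int) : pvA nl [] = nl := by
  simp [pvA, Finset.range_one, pvC_nil]

theorem pvB_fold (nl : Int) (t : List Char) :
    t.foldl (pvStepB nl) (0, nl, 0) = ((t.length : Int), pvA nl t, pvC t) := by
  induction t using List.reverseRecOn with
  | nil => simp [pvA_nil, pvC_nil]
  | append_singleton t c ih =>
    rw [List.foldl_append, ih]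
    have hcost : (if c == '1' then min (pvC t + 2) ((t.length : Int) + 1) else pvC t)
        = pvC (t ++ [c]) := (pvC_snoc t c).symm
    simp only [pvStepB, List.foldl_cons, List.foldl_nil, hcost]
    refine Prod.ext (by push_cast; simp) (Prod.ext ?_ rfl)
    simp only [pvA_snoc nl t c]
    congr 1
    ring

theorem pvMem_pairs {n a b : Nat} (hab : a ≤ b) (hb : b ≤ n) : (a, b) ∈ pvPairs n := by
  simp [pvPairs, Finset.mem_filter, Finset.mem_product, Finset.mem_range]
  omega

theorem pvA_eq_M (l : List Char) : pvA (l.length : Int) l = pvM l := by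
  apply le_antisymm
  · obtain ⟨p, hp, hM⟩ := Finset.exists_mem_eq_inf' (pvPairs_nonempty l.length) (fun p => pvF l p.1 p.2)
    rw [pvM, hM]
    simp only [pvPairs, Finset.mem_filter, Finset.mem_product, Finset.mem_range] at hp
    obtain ⟨⟨h1, h2⟩, hab⟩ := hp
    have step1 : pvA (l.length : Int) l ≤ pvC (l.take p.2) + (l.length : Int) - (p.2 : Int) := by
      apply Finset.inf'_le
      simpa [Finset.mem_range] using h2
    have hlen : (l.take p.2).length = p.2 := by
      simp; omega
    have step2 : pvC (l.take p.2) ≤ (p.1 : Int) + 2 * pvCnt ((l.take p.2).drop p.1) := by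
      apply Finset.inf'_le (s := Finset.range ((l.take p.2).length + 1))
      simp [Finset.mem_range, hlen]
      omega
    rw [List.drop_take] at step2
    rw [pvF]
    linarith
  · rw [pvA]
    apply Finset.le_inf'
    intro b hb
    have hb' : b ≤ l.length := by simpa [Nat.lt_succ_iff] using hb
    have hlen : (l.take b).length = b := by simp; omega
    have : pvM l - ((l.length : Int) - (b : Int)) ≤ pvC (l.take b) := by
      rw [pvC]
      apply Finset.le_inf'
      intro a ha
      have ha' : a ≤ b := by rw [hlen] at ha; simpa [Nat.lt_succ_iff] using ha
      have hmem := pvMem_pairs ha' hb'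
      have := Finset.inf'_le (s := pvPairs l.length) (fun p => pvF l p.1 p.2) hmem
      rw [pvM]
      rw [List.drop_take]
      simp only at this
      rw [pvF] at this
      linarith
    linarith

theorem pvAlt_eq (s : String) : minimumTime_alt s = pvM s.toList := by
  simp only [minimumTime_alt, PySem.Str.len_eq]
  rw [pvB_fold]
  exact pvA_eq_M s.toList

-- ---------- A's side ----------

def pvLeftL (l : List Char) : List Int := (List.range l.length).map (fun j => pvD (l.take (j+1)))
def pvRightL (l : List Char) : List Int := (List.range l.length).map (fun k => pvD (l.drop k))
-- running maxima of A's third and fourth passes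
def pvLM (l : List Char) (i : Nat) : Int :=
  (Finset.range (i+1)).sup' (pvRangeNE _) (fun j => pvD (l.take (j+1)))
def pvRM (l : List Char) (i : Nat) : Int :=
  (insert (l.length - 1) (Finset.Icc i (l.length - 1))).sup' (Finset.insert_nonempty _ _) (fun k => pvD (l.drop k))
-- the two savings maxima as they enter A's final pass (with the max(0, ·) applied)
def pvSL (l : List Char) (i : Nat) : Int := (Finset.range (i+2)).sup' (pvRangeNE _) (pvP l)
def pvSR (l : List Char) (i : Nat) : Int :=
  (insert l.length (Finset.Icc i l.length)).sup' (Finset.insert_nonempty _ _) (pvQ l)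

theorem pvLeft_fold (t : List Char) : t.foldl pvStepAcc ([], 0) = (pvLeftL t, pvD t) := by
  induction t using List.reverseRecOn with
  | nil => simp [pvLeftL, pvD, pvCnt]
  | append_singleton t c ih =>
    rw [List.foldl_append, ih]
    simp only [List.foldl_cons, List.foldl_nil, pvStepAcc]
    have hD : (if c == '1' then pvD t + 1 else pvD t - 1) = pvD (t ++ [c]) := by
      by_cases hc : c = '1' <;>
        simp only [pvD, pvCnt_append, pvCnt_singleton, hc, List.length_append, List.length_cons,
          List.length_nil, beq_self_eq_true, if_true, beq_iff_eq, if_false] <;> push_cast <;> ring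
    rw [hD]
    refine Prod.ext ?_ rfl
    simp only [pvLeftL, List.length_append, List.length_cons, List.length_nil, List.range_succ,
      List.map_append, List.map_cons, List.map_nil]
    congr 1
    · apply List.map_congr_left
      intro j hj
      simp only [List.mem_range] at hj
      rw [List.take_append_of_le_length (by omega)]
    · rw [List.take_of_length_le (by simp)]

theorem pvRevMapRange (g : Nat → Int) (n : Nat) :
    ((List.range n).map g).reverse = (List.range n).map (fun k => g (n-1-k)) := by
  apply List.ext_getElem
  · simp
  · intro k h1 h2
    simp [List.getElem_reverse]

theorem pvRight_eq (l : List Char) : ((l.reverse.foldl pvStepAcc ([], 0)).1).reverse = pvRightL l := by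
  rw [pvLeft_fold]
  simp only [pvLeftL, List.length_reverse]
  rw [pvRevMapRange]
  apply List.map_congr_left
  intro k hk
  simp only [List.mem_range] at hk
  have h1 : l.length - 1 - k + 1 = l.length - k := by omega
  rw [h1, List.take_reverse]
  have h2 : l.length - (l.length - k) = k := by omega
  rw [h2]
  simp [pvD, pvCnt, pvRightL]

theorem pvP_eq_D (l : List Char) (a : Nat) (ha : a ≤ l.length) : pvD (l.take a) = pvP l a := by
  simp [pvD, pvP, List.length_take, Nat.min_eq_left ha]

theorem pvQ_eq_D (l : List Char) (k : Nat) (hk : k ≤ l.length) : pvD (l.drop k) = pvQ l k := by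
  have hcast : ((l.length - k : Nat) : Int) = (l.length : Int) - (k : Int) := by omega
  simp [pvD, pvQ, List.length_drop, hcast]

theorem pvLM_zero (l : List Char) : pvLM l 0 = pvD (l.take 1) := by
  simp [pvLM, Finset.range_one]

theorem pvRM_last (l : List Char) : pvRM l (l.length - 1) = pvD (l.drop (l.length - 1)) := by
  have hset : insert (l.length - 1) (Finset.Icc (l.length - 1) (l.length - 1))
      = ({l.length - 1} : Finset Nat) := by
    simp [Finset.Icc_self]
  simp [pvRM, hset]

theorem pvGetLast (g : Nat → Int) (n : Nat) (hn : 0 < n) :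
    PySem.List.pyGetD ((List.range n).map g) (-1) 0 = g (n-1) := by
  simp [PySem.List.pyGetD, PySem.List.pyGet?, PySem.List.pyIdx?, Nat.one_le_iff_ne_zero]
  rw [if_neg (by omega : ¬ n = 0)]
  simp [List.getElem?_range (by omega : n - 1 < n)]

theorem pvRM_rec (l : List Char) (i : Nat) (hi : i + 1 ≤ l.length - 1) :
    pvRM l i = max (pvRM l (i+1)) (pvD (l.drop i)) := by
  unfold pvRM
  apply le_antisymm
  · apply Finset.sup'_le
    intro k hk
    simp only [Finset.mem_insert, Finset.mem_Icc] at hk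
    by_cases hki : k = i
    · subst hki
      exact le_max_right _ _
    · have hmem : k ∈ insert (l.length - 1) (Finset.Icc (i+1) (l.length - 1)) := by
        simp only [Finset.mem_insert, Finset.mem_Icc]
        omega
      exact le_trans (Finset.le_sup' (f := fun k => pvD (List.drop k l)) hmem) (le_max_left _ _)
  · apply max_le
    · apply Finset.sup'_le
      intro k hk
      refine Finset.le_sup' (f := fun k => pvD (List.drop k l)) ?_
      simp only [Finset.mem_insert, Finset.mem_Icc] at hk ⊢
      omega
    · refine Finset.le_sup' (f := fun k => pvD (List.drop k l)) ?_
      simp only [Finset.mem_insert, Finset.mem_Icc]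
      omega

theorem pvLM_fold (l : List Char) (m : Nat) (hm : m + 1 ≤ l.length) :
    (List.range m).foldl (fun st (j : Nat) => pvStepMax (pvLeftL l) st (1 + (j : Int))) ([pvLM l 0], pvLM l 0)
      = ((List.range (m+1)).map (fun i => pvLM l i), pvLM l m) := by
  induction m with
  | zero => simp
  | succ m ih =>
    have hm' : m + 1 ≤ l.length := by omega
    rw [List.range_succ, List.foldl_append, ih hm']
    simp only [List.foldl_cons, List.foldl_nil, pvStepMax]
    have hidx : (1 + (m : Int)) = ((m + 1 : Nat) : Int) := by push_cast; ring
    have hget : PySem.List.pyGetD (pvLeftL l) (1 + (m : Int)) 0 = pvD (l.take (m+2)) := by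
      rw [hidx, PySem.List.pyGetD_natCast, pvLeftL, PySem.List.getD_map_range _ _ _ _ (by omega)]
    have hrec : pvLM l (m+1) = max (pvLM l m) (pvD (l.take (m+2))) := by
      rw [pvLM, pvSupPeel m]
      rw [max_comm]
      rfl
    rw [hget, ← hrec]
    refine Prod.ext ?_ rfl
    simp only [List.range_succ, List.map_append, List.map_cons, List.map_nil]

theorem pvRM_fold (l : List Char) (m : Nat) (hm : m + 1 ≤ l.length) :
    (List.range m).foldl (fun st (k : Nat) => pvStepMax (pvRightL l) st ((l.length : Int) - 2 - (k : Int)))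
        ([pvRM l (l.length - 1)], pvRM l (l.length - 1))
      = ((List.range (m+1)).map (fun j => pvRM l (l.length - 1 - j)), pvRM l (l.length - 1 - m)) := by
  induction m with
  | zero => simp
  | succ m ih =>
    have hm' : m + 1 ≤ l.length := by omega
    rw [List.range_succ, List.foldl_append, ih hm']
    simp only [List.foldl_cons, List.foldl_nil, pvStepMax]
    have hidx : ((l.length : Int) - 2 - (m : Int)) = ((l.length - 2 - m : Nat) : Int) := by omega
    have hget : PySem.List.pyGetD (pvRightL l) ((l.length : Int) - 2 - (m : Int)) 0
        = pvD (l.drop (l.length - 2 - m)) := by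
      rw [hidx, PySem.List.pyGetD_natCast, pvRightL, PySem.List.getD_map_range _ _ _ _ (by omega)]
    have e1 : l.length - 1 - (m + 1) = l.length - 2 - m := by omega
    have e2 : (l.length - 2 - m) + 1 = l.length - 1 - m := by omega
    have hrec : pvRM l (l.length - 1 - (m+1))
        = max (pvRM l (l.length - 1 - m)) (pvD (l.drop (l.length - 2 - m))) := by
      rw [e1, pvRM_rec l _ (by omega), e2]
    rw [hget, ← hrec]
    refine Prod.ext ?_ rfl
    simp only [List.range_succ, List.map_append, List.map_cons, List.map_nil]

theorem pvSL_eq (l : List Char) (i : Nat) (hi : i + 1 ≤ l.length) :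
    max 0 (pvLM l i) = pvSL l i := by
  apply le_antisymm
  · apply max_le
    · have h0 : pvP l 0 = 0 := by simp [pvP, pvCnt]
      calc (0 : Int) = pvP l 0 := h0.symm
        _ ≤ pvSL l i := Finset.le_sup' _ (by simp [Finset.mem_range])
    · apply Finset.sup'_le
      intro j hj
      simp only [Finset.mem_range] at hj
      rw [pvP_eq_D l (j+1) (by omega)]
      exact Finset.le_sup' _ (Finset.mem_range.mpr (by omega))
  · apply Finset.sup'_le
    intro a ha
    simp only [Finset.mem_range] at ha
    rcases a with _ | j
    · simp [pvP, pvCnt]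
    · rw [← pvP_eq_D l (j+1) (by omega)]
      refine le_trans ?_ (le_max_right _ _)
      rw [pvLM]
      exact Finset.le_sup' (f := fun j => pvD (List.take (j+1) l)) (Finset.mem_range.mpr (by omega))

theorem pvSR_eq (l : List Char) (i : Nat) (hi : i ≤ l.length - 1) (hl : l ≠ []) :
    max 0 (pvRM l i) = pvSR l i := by
  have hn : 1 ≤ l.length := List.length_pos_iff.2 hl
  have hQn : pvQ l l.length = 0 := by simp [pvQ, pvCnt]
  apply le_antisymm
  · apply max_le
    · calc (0 : Int) = pvQ l l.length := hQn.symm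
        _ ≤ pvSR l i := Finset.le_sup' _ (by simp)
    · apply Finset.sup'_le
      intro k hk
      simp only [Finset.mem_insert, Finset.mem_Icc] at hk
      rw [pvQ_eq_D l k (by omega)]
      apply Finset.le_sup'
      simp only [Finset.mem_insert, Finset.mem_Icc]
      omega
  · apply Finset.sup'_le
    intro k hk
    simp only [Finset.mem_insert, Finset.mem_Icc] at hk
    by_cases hkn : k = l.length
    · subst hkn
      rw [hQn]
      exact le_max_left _ _
    · rw [← pvQ_eq_D l k (by omega)]
      refine le_trans (Finset.le_sup' (fun k => pvD (l.drop k)) ?_) (le_max_right _ _)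
      simp only [Finset.mem_insert, Finset.mem_Icc]
      omega

theorem pvFoldMax (g : Nat → Int) (c : Int) (m : Nat) (hm : 0 < m) :
    (List.range m).foldl (fun a k => max a (g k)) c
      = max c ((Finset.range m).sup' (Finset.nonempty_range_iff.2 (by omega)) g) := by
  induction m with
  | zero => omega
  | succ m ih =>
    rcases Nat.eq_zero_or_pos m with h0 | hpos
    · subst h0
      simp [List.range_succ, Finset.range_one]
    · rw [List.range_succ, List.foldl_append, ih hpos]
      simp only [List.foldl_cons, List.foldl_nil]
      obtain ⟨k, rfl⟩ : ∃ k, m = k + 1 := ⟨m - 1, by omega⟩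
      rw [pvSupPeel k g]
      omega

theorem pvCount_go (l : List Char) (fuel acc : Nat) (h : l.length ≤ fuel) :
    PySem.Chars.count.go ['1'] fuel l acc = acc + l.count '1' := by
  induction l generalizing fuel acc with
  | nil => cases fuel <;> simp [PySem.Chars.count.go]
  | cons c t ih =>
    cases fuel with
    | zero => simp at h
    | succ f =>
      have ht : t.length ≤ f := by simpa using h
      by_cases hc : c = '1'
      · subst hc
        have hpre : (['1'] : List Char).isPrefixOf ('1' :: t) = true := by
          simp [List.isPrefixOf]
        simp only [PySem.Chars.count.go, hpre, if_true, List.length_cons, List.length_nil,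
          List.drop_succ_cons, List.drop_zero]
        rw [ih _ _ ht]
        simp only [List.count_cons, beq_self_eq_true, if_true]
        omega
      · have hpre : (['1'] : List Char).isPrefixOf (c :: t) = false := by
          simp [List.isPrefixOf]
          exact fun h' => hc h'.symm
        simp only [PySem.Chars.count.go, hpre, Bool.false_eq_true, if_false]
        rw [ih _ _ ht]
        have : ('1' == c) = false := by
          simp
          exact fun h' => hc h'.symm
        simp [List.count_cons, this, hc]

theorem pvStrCount (s : String) : (PySem.Str.count s "1" : Int) = pvCnt s.toList := by
  rw [PySem.Str.count_eq]
  have h1 : ("1" : String).toList = ['1'] := rfl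
  rw [h1, PySem.Chars.count]
  simp only [List.isEmpty_cons, Bool.false_eq_true, if_false]
  rw [pvCount_go _ _ _ (le_refl _)]
  simp [pvCnt]

theorem pvM_single (c : Char) : pvM [c] = if c = '1' then 1 else 0 := by
  have e00 : pvF [c] 0 0 = 1 := by simp [pvF, pvCnt]
  have e11 : pvF [c] 1 1 = 1 := by simp [pvF, pvCnt]
  have e01 : pvF [c] 0 1 = if c = '1' then 2 else 0 := by
    have : pvF [c] 0 1 = 2 * pvCnt [c] := by simp [pvF]
    rw [this, pvCnt_singleton]
    split_ifs <;> ring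
  have hm00 : ((0,0) : Nat × Nat) ∈ pvPairs 1 := by decide
  have hm01 : ((0,1) : Nat × Nat) ∈ pvPairs 1 := by decide
  apply le_antisymm
  · by_cases hc : c = '1'
    · rw [if_pos hc]
      calc pvM [c] ≤ pvF [c] 0 0 := Finset.inf'_le _ hm00
        _ = 1 := e00
    · rw [if_neg hc]
      calc pvM [c] ≤ pvF [c] 0 1 := Finset.inf'_le _ hm01
        _ = 0 := by rw [e01, if_neg hc]
  · rw [pvM]
    apply Finset.le_inf'
    intro p hp
    simp only [pvPairs, Finset.mem_filter, Finset.mem_product, Finset.mem_range,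
      List.length_cons, List.length_nil] at hp
    obtain ⟨⟨ha, hb⟩, hab⟩ := hp
    rcases p with ⟨a, b⟩
    simp only at ha hb hab ⊢
    interval_cases a <;> interval_cases b <;> simp only [e00, e01, e11] <;>
      split_ifs <;> omega

theorem pvA_final (l : List Char) (hl : 2 ≤ l.length) :
    2 * pvCnt l - (Finset.range (l.length - 1)).sup'
        (Finset.nonempty_range_iff.2 (by omega)) (fun i => pvSL l i + pvSR l (i+1))
      = pvM l := by
  have hne : (Finset.range (l.length - 1)).Nonempty := Finset.nonempty_range_iff.2 (by omega)
  apply le_antisymm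
  · rw [pvM]
    apply Finset.le_inf'
    intro p hp
    simp only [pvPairs, Finset.mem_filter, Finset.mem_product, Finset.mem_range] at hp
    obtain ⟨⟨ha, hb⟩, hab⟩ := hp
    have ha' : p.1 ≤ l.length := by omega
    have hb' : p.2 ≤ l.length := by omega
    rw [pvSplit l p.1 p.2 hab hb']
    have hterm : pvP l p.1 + pvQ l p.2
        ≤ (Finset.range (l.length - 1)).sup' hne (fun i => pvSL l i + pvSR l (i+1)) := by
      by_cases hcase : p.2 = 0 ∨ p.1 = l.length
      · have hPQ : pvP l p.1 + pvQ l p.2 = pvD l := by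
          rcases hcase with h0 | hn
          · have : p.1 = 0 := by omega
            rw [this, h0]
            exact pvPQ l 0 (by omega)
          · have : p.2 = l.length := by omega
            rw [this, hn]
            exact pvPQ l l.length (by omega)
        have hPQ2 : pvD l = pvP l (l.length - 1) + pvQ l (l.length - 1) :=
          (pvPQ l (l.length - 1) (by omega)).symm
        have h1 : pvP l (l.length - 1) ≤ pvSL l (l.length - 2) := by
          rw [pvSL]
          exact Finset.le_sup' _ (Finset.mem_range.mpr (by omega))
        have h2 : pvQ l (l.length - 1) ≤ pvSR l (l.length - 1) := by
          rw [pvSR]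
          exact Finset.le_sup' _ (by simp only [Finset.mem_insert, Finset.mem_Icc]; omega)
        have h3 : pvSL l (l.length - 2) + pvSR l (l.length - 2 + 1)
            ≤ (Finset.range (l.length - 1)).sup' hne (fun i => pvSL l i + pvSR l (i+1)) :=
          Finset.le_sup' (f := fun i => pvSL l i + pvSR l (i+1)) (b := l.length - 2)
            (Finset.mem_range.mpr (by omega))
        have he : l.length - 2 + 1 = l.length - 1 := by omega
        rw [he] at h3
        omega
      · rw [not_or] at hcase
        obtain ⟨hb0, han⟩ := hcase
        have h1 : pvP l p.1 ≤ pvSL l (min (p.2 - 1) (l.length - 2)) := by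
          rw [pvSL]
          exact Finset.le_sup' _ (Finset.mem_range.mpr (by omega))
        have h2 : pvQ l p.2 ≤ pvSR l (min (p.2 - 1) (l.length - 2) + 1) := by
          rw [pvSR]
          exact Finset.le_sup' _ (by simp only [Finset.mem_insert, Finset.mem_Icc]; omega)
        have h3 : pvSL l (min (p.2 - 1) (l.length - 2)) + pvSR l (min (p.2 - 1) (l.length - 2) + 1)
            ≤ (Finset.range (l.length - 1)).sup' hne (fun i => pvSL l i + pvSR l (i+1)) :=
          Finset.le_sup' (f := fun i => pvSL l i + pvSR l (i+1)) (b := min (p.2 - 1) (l.length - 2))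
            (Finset.mem_range.mpr (by omega))
        omega
    linarith
  · have hS : (Finset.range (l.length - 1)).sup' hne (fun i => pvSL l i + pvSR l (i+1))
        ≤ 2 * pvCnt l - pvM l := by
      apply Finset.sup'_le
      intro i hi
      simp only [Finset.mem_range] at hi
      obtain ⟨a, hamem, haeq⟩ := Finset.exists_mem_eq_sup' (pvRangeNE (i+1)) (pvP l)
      obtain ⟨b, hbmem, hbeq⟩ := Finset.exists_mem_eq_sup'
        (Finset.insert_nonempty l.length (Finset.Icc (i+1) l.length)) (pvQ l)
      simp only [Finset.mem_range] at hamem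
      simp only [Finset.mem_insert, Finset.mem_Icc] at hbmem
      have hab : a ≤ b := by omega
      have hbn : b ≤ l.length := by omega
      have hMF : pvM l ≤ pvF l a b := Finset.inf'_le _ (pvMem_pairs hab hbn)
      rw [pvSplit l a b hab hbn] at hMF
      rw [pvSL, haeq, pvSR, hbeq]
      linarith
    linarith

theorem pvLM0 (l : List Char) (h : l ≠ []) : PySem.List.pyGetD (pvLeftL l) 0 0 = pvLM l 0 := by
  have hp : 0 < l.length := List.length_pos_iff.2 h
  rw [PySem.List.pyGetD_ofNat', pvLeftL, PySem.List.getD_map_range _ _ _ _ hp, pvLM_zero]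

theorem pvRM0 (l : List Char) (h : l ≠ []) :
    PySem.List.pyGetD (pvRightL l) (-1) 0 = pvRM l (l.length - 1) := by
  have hp : 0 < l.length := List.length_pos_iff.2 h
  rw [pvRightL, pvGetLast _ _ hp, pvRM_last]

theorem pvLeftMax_eq (l : List Char) (h2 : 2 ≤ l.length) :
    ((PySem.List.pyRange 1 (l.length : Int) 1).foldl (pvStepMax (pvLeftL l)) ([pvLM l 0], pvLM l 0)).1
      = (List.range l.length).map (fun i => pvLM l i) := by
  rw [PySem.List.pyRange_one]
  have ht : ((l.length : Int) - 1).toNat = l.length - 1 := by omega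
  rw [ht, List.foldl_map]
  rw [pvLM_fold l (l.length - 1) (by omega)]
  have he : l.length - 1 + 1 = l.length := by omega
  rw [he]

theorem pvRightMax_eq (l : List Char) (h2 : 2 ≤ l.length) :
    (((PySem.List.pyRange ((l.length : Int) - 2) (-1) (-1)).foldl (pvStepMax (pvRightL l))
        ([pvRM l (l.length - 1)], pvRM l (l.length - 1))).1).reverse
      = (List.range l.length).map (fun k => pvRM l k) := by
  rw [PySem.List.pyRange_neg_one]
  have ht : ((l.length : Int) - 2 - (-1)).toNat = l.length - 1 := by omega
  rw [ht, List.foldl_map]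
  rw [pvRM_fold l (l.length - 1) (by omega)]
  dsimp only
  have he : l.length - 1 + 1 = l.length := by omega
  rw [he, pvRevMapRange]
  apply List.map_congr_left
  intro k hk
  simp only [List.mem_range] at hk
  congr 1
  omega

theorem pvSL_nonneg (l : List Char) (i : Nat) : 0 ≤ pvSL l i := by
  have h0 : pvP l 0 = 0 := by simp [pvP, pvCnt]
  calc (0 : Int) = pvP l 0 := h0.symm
    _ ≤ pvSL l i := Finset.le_sup' _ (Finset.mem_range.mpr (by omega))

theorem pvSR_nonneg (l : List Char) (i : Nat) : 0 ≤ pvSR l i := by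
  have h0 : pvQ l l.length = 0 := by simp [pvQ, pvCnt]
  calc (0 : Int) = pvQ l l.length := h0.symm
    _ ≤ pvSR l i := Finset.le_sup' _ (by simp)

theorem pvSave_eq (l : List Char) (h2 : 2 ≤ l.length) :
    (PySem.List.pyRange 0 ((l.length : Int) - 1) 1).foldl
      (fun sv i => max sv (max 0 (PySem.List.pyGetD ((List.range l.length).map (fun i => pvLM l i)) i 0)
        + max 0 (PySem.List.pyGetD ((List.range l.length).map (fun k => pvRM l k)) (i + 1) 0))) 0
      = (Finset.range (l.length - 1)).sup' (Finset.nonempty_range_iff.2 (by omega))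
          (fun i => pvSL l i + pvSR l (i+1)) := by
  have hl : l ≠ [] := by intro he; rw [he] at h2; simp at h2
  rw [PySem.List.pyRange_one]
  have ht : ((l.length : Int) - 1 - 0).toNat = l.length - 1 := by omega
  rw [ht, List.foldl_map]
  have hstep := PySem.List.foldl_congr_mem (List.range (l.length - 1))
    (fun sv (k : Nat) => max sv (max 0 (PySem.List.pyGetD ((List.range l.length).map (fun i => pvLM l i)) (0 + (k : Int)) 0)
        + max 0 (PySem.List.pyGetD ((List.range l.length).map (fun k => pvRM l k)) (0 + (k : Int) + 1) 0)))
    (fun sv (k : Nat) => max sv (pvSL l k + pvSR l (k+1))) (0 : Int) ?_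
  · rw [hstep, pvFoldMax _ 0 _ (by omega)]
    have hTnn : (0 : Int) ≤ pvSL l 0 + pvSR l 1 := add_nonneg (pvSL_nonneg l 0) (pvSR_nonneg l 1)
    have hsup : (0 : Int) ≤ (Finset.range (l.length - 1)).sup'
        (Finset.nonempty_range_iff.2 (by omega)) (fun i => pvSL l i + pvSR l (i+1)) :=
      le_trans hTnn (Finset.le_sup' (f := fun i => pvSL l i + pvSR l (i+1)) (b := 0)
        (Finset.mem_range.mpr (by omega)))
    rw [max_eq_right hsup]
  · intro acc k hk
    simp only [List.mem_range] at hk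
    dsimp only
    simp only [zero_add]
    have e2 : ((k : Int) + 1) = ((k + 1 : Nat) : Int) := by push_cast; ring
    rw [e2, PySem.List.pyGetD_natCast, PySem.List.pyGetD_natCast,
      PySem.List.getD_map_range _ _ _ _ (by omega), PySem.List.getD_map_range _ _ _ _ (by omega),
      pvSL_eq l k (by omega), pvSR_eq l (k+1) (by omega) hl]

theorem pvA_eq (s : String) (h : s ≠ "") : minimumTime s = pvM s.toList := by
  have hl : s.toList ≠ [] := by
    intro he
    exact h (String.toList_injective (by simp [he]))
  have hn1 : 1 ≤ s.toList.length := List.length_pos_iff.2 hl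
  by_cases hone : s.toList.length = 1
  · obtain ⟨c, hc⟩ := List.length_eq_one_iff.mp hone
    have hcond : (PySem.Str.len s == 1) = true := by
      simp only [PySem.Str.len_eq, beq_iff_eq]
      omega
    simp only [minimumTime, hcond, if_true]
    rw [hc, pvM_single]
    by_cases hc1 : c = '1'
    · have hs1 : s = "1" := String.toList_injective (by rw [hc, hc1]; rfl)
      simp [hs1, hc1]
    · have hs1 : ¬ s = "1" := by
        intro he
        apply hc1
        have := congrArg String.toList he
        rw [hc] at this
        simpa using this
      simp [hs1, hc1]
  · have h2 : 2 ≤ s.toList.length := by omega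
    have hcond : (PySem.Str.len s == 1) = false := by
      simp only [PySem.Str.len_eq, beq_eq_false_iff_ne, ne_eq]
      omega
    simp only [minimumTime, hcond, Bool.false_eq_true, if_false]
    rw [pvRight_eq s.toList, pvLeft_fold s.toList]
    dsimp only
    rw [pvLM0 s.toList hl, pvRM0 s.toList hl, PySem.Str.len_eq]
    rw [pvLeftMax_eq s.toList h2, pvRightMax_eq s.toList h2]
    rw [pvSave_eq s.toList h2, pvStrCount s]
    exact pvA_final s.toList h2

-- ===== VERDICT (by name: the statement is the Claim_ definition above) =====
theorem minimumTime_spec : Claim_equal_minimumTime := by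
  intro s _ hpre
  unfold Spec_minimumTime
  rw [pvA_eq s hpre, pvAlt_eq s]
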